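-- pv_equiv track=rewrite | github.com/Hindu-sathvi/Leetcode-problems | Mtrixcells_distanceorder.py | DistanceOrder
-- ===== SOURCE A (Python) =====
-- def DistanceOrder(rows, cols, rCenter, cCenter):
--     # Create a list of all the cells in the matrix
--     cells = []
--     for r in range(rows):
--         for c in range(cols):
--             cells.append((r, c))
--
--     # Define a function to calculate the Manhattan distance for a cell
--     def calculate_distance(cell):
--         row_distance = abs(cell[0] - rCenter)
--         col_distance = abs(cell[1] - cCenter)
--         total_distance = row_distance + col_distance
--         return total_distance
--
--     # Sorting the cells
--     cells.sort(key=calculate_distance)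
--
--     return cells
-- ===== SOURCE B (Python) =====
-- def DistanceOrder(rows, cols, rCenter, cCenter):
--     # Counting/bucket sort by the bounded Manhattan distance, filling buckets
--     # in row-major order (stable), then concatenating buckets in distance order.
--     if rows <= 0 or cols <= 0:
--         return []
--     dmin = max(0, -rCenter, rCenter - rows + 1) + max(0, -cCenter, cCenter - cols + 1)
--     dmax = max(abs(rCenter), abs(rows - 1 - rCenter)) + max(abs(cCenter), abs(cols - 1 - cCenter))
--     buckets = {}
--     for r in range(rows):
--         for c in range(cols):
--             d = abs(r - rCenter) + abs(c - cCenter)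
--             buckets.setdefault(d, []).append((r, c))
--     out = []
--     for d in range(dmin, dmax + 1):
--         out += buckets.get(d, [])
--     return out
-- ===== Notes on version B (the rewrite author's own statement) =====
-- stated objective: alternative
-- what changed: Replaces building all cells and comparison-sorting them by Manhattan distance with a one-pass bucket (counting) sort: cells are appended to per-distance buckets in row-major order and the buckets are concatenated in increasing distance order, which reproduces the stable sort exactly; asymptotically O(N) vs O(N log N), though not measurably faster in CPython where timsort runs in C.
import Mathlib
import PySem

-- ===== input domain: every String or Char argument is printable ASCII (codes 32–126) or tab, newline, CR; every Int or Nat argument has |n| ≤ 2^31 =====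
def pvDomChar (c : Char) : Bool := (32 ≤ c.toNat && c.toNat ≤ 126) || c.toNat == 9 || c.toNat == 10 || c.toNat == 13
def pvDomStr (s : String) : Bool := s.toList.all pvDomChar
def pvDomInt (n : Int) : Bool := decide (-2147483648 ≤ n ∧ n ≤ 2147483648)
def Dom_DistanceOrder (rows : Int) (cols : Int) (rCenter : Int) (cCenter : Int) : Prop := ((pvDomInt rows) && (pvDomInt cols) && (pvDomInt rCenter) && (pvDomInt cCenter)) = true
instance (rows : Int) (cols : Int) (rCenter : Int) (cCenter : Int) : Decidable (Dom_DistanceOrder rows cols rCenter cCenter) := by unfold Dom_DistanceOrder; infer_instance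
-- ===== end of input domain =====

-- B replaces A's comparison sort with a one-pass bucket (counting) sort over the
-- bounded range of Manhattan distances (same result; different algorithm).

-- ===== PORT A =====
-- literal port of A: build all cells row-major, then stable-sort by Manhattan distance
def DistanceOrder (rows : Int) (cols : Int) (rCenter : Int) (cCenter : Int) : List (Int × Int) :=
  let cells := (PySem.List.pyRange 0 rows).foldl
    (fun acc r => (PySem.List.pyRange 0 cols).foldl (fun acc c => acc ++ [(r, c)]) acc) []
  PySem.List.sorted cells (fun cell => |cell.1 - rCenter| + |cell.2 - cCenter|)

-- ===== PORT B =====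
-- literal port of Source B: fill distance buckets (a dict) in row-major order, then
-- concatenate the buckets for d = dmin .. dmax
def DistanceOrder_alt (rows : Int) (cols : Int) (rCenter : Int) (cCenter : Int) : List (Int × Int) :=
  if rows ≤ 0 ∨ cols ≤ 0 then []
  else
    let dmin := max 0 (max (-rCenter) (rCenter - rows + 1)) + max 0 (max (-cCenter) (cCenter - cols + 1))
    let dmax := max |rCenter| |rows - 1 - rCenter| + max |cCenter| |cols - 1 - cCenter|
    let buckets := (PySem.List.pyRange 0 rows).foldl
      (fun bk r => (PySem.List.pyRange 0 cols).foldl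
        (fun bk c => bk.modify (|r - rCenter| + |c - cCenter|) [] (· ++ [(r, c)])) bk)
      (PySem.Dict.empty (κ := Int) (ν := List (Int × Int)))
    (PySem.List.pyRange dmin (dmax + 1)).foldl (fun out d => out ++ buckets.getD d []) []

-- ===== PRECONDITION & SPEC =====
def Spec_DistanceOrder (rows : Int) (cols : Int) (rCenter : Int) (cCenter : Int) (out : List (Int × Int)) : Prop := out = DistanceOrder_alt rows cols rCenter cCenter
instance (rows : Int) (cols : Int) (rCenter : Int) (cCenter : Int) (out : List (Int × Int)) : Decidable (Spec_DistanceOrder rows cols rCenter cCenter out) := by unfold Spec_DistanceOrder; infer_instance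

-- ===== CLAIM (what is proved, stated in full; the proofs are below) =====
def Claim_equal_DistanceOrder : Prop := ∀ (rows : Int) (cols : Int) (rCenter : Int) (cCenter : Int), Dom_DistanceOrder rows cols rCenter cCenter → Spec_DistanceOrder rows cols rCenter cCenter (DistanceOrder rows cols rCenter cCenter)

-- ===== LEMMAS AND PROOFS =====

-- all the cells in row-major order (shared description of both programs' traversal)
def pvCells (rows : Int) (cols : Int) : List (Int × Int) :=
  (PySem.List.pyRange 0 rows).flatMap (fun r => (PySem.List.pyRange 0 cols).map (fun c => (r, c)))

-- inserting past a prefix none of whose elements come after x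
theorem pv_insertBy_append {α : Type} (before : α → α → Bool) (x : α) (P Q : List α)
    (h : ∀ y ∈ P, before x y = false) :
    PySem.List.insertBy before x (P ++ Q) = P ++ PySem.List.insertBy before x Q := by
  induction P with
  | nil => simp
  | cons p P ih =>
    have hp : before x p = false := h p (by simp)
    simp [PySem.List.insertBy, hp, ih (fun y hy => h y (by simp [hy]))]

-- inserting before a block all of whose elements come after x
theorem pv_insertBy_front {α : Type} (before : α → α → Bool) (x : α) (Q : List α)
    (h : ∀ y ∈ Q, before x y = true) :
    PySem.List.insertBy before x Q = x :: Q := by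
  cases Q with
  | nil => rfl
  | cons q Q => simp [PySem.List.insertBy, h q (by simp)]

-- pyRange a b is strictly increasing
theorem pv_pyRange_pairwise_lt (a b : Int) : (PySem.List.pyRange a b).Pairwise (· < ·) := by
  have key : ∀ (n : Nat) (a : Int), (b - a).toNat ≤ n → (PySem.List.pyRange a b).Pairwise (· < ·) := by
    intro n
    induction n with
    | zero =>
      intro a ha
      have : PySem.List.pyRange a b = [] := by
        apply List.eq_nil_iff_forall_not_mem.2
        intro x hx
        rw [PySem.List.mem_pyRange_one] at hx
        omega
      simp [this]
    | succ n ih =>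
      intro a ha
      by_cases hab : a < b
      · rw [PySem.List.pyRange_one_cons hab]
        refine List.Pairwise.cons ?_ (ih (a + 1) (by omega))
        intro y hy
        rw [PySem.List.mem_pyRange_one] at hy
        omega
      · have : PySem.List.pyRange a b = [] := by
          apply List.eq_nil_iff_forall_not_mem.2
          intro x hx
          rw [PySem.List.mem_pyRange_one] at hx
          omega
        simp [this]
  exact key (b - a).toNat a le_rfl

-- a stable sort is the concatenation of its key buckets, taken in increasing key order
theorem pv_sorted_eq_flatMap_filter {α : Type} (key : α → Int) (xs : List α) (ds : List Int)
    (hds : ds.Pairwise (· < ·)) (hxs : ∀ x ∈ xs, key x ∈ ds) :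
    PySem.List.sorted xs key = ds.flatMap (fun d => xs.filter (fun x => key x == d)) := by
  induction xs using List.reverseRecOn with
  | nil => rw [PySem.List.sorted_eq_foldl_insertBy]; simp
  | append_singleton ys x ih =>
    have hys : ∀ y ∈ ys, key y ∈ ds := fun y hy => hxs y (by simp [hy])
    have hx : key x ∈ ds := hxs x (by simp)
    obtain ⟨ds1, ds2, rfl⟩ := List.append_of_mem hx
    have hpw := hds
    rw [List.pairwise_append] at hpw
    obtain ⟨hpw1, hpw2, hcross⟩ := hpw
    have hlt2 : ∀ d ∈ ds2, key x < d := (List.pairwise_cons.1 hpw2).1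
    have hlt1 : ∀ d ∈ ds1, d < key x := fun d hd => hcross d hd (key x) (by simp)
    -- stable insertion sort on ys ++ [x] = insert x into the sorted ys
    rw [PySem.List.sorted_eq_foldl_insertBy, List.foldl_append, ← PySem.List.sorted_eq_foldl_insertBy,
        ih hys]
    set F : Int → List α := fun d => ys.filter (fun y => key y == d) with hF
    have hsplit : (ds1 ++ key x :: ds2).flatMap F
        = (ds1.flatMap F ++ F (key x)) ++ ds2.flatMap F := by
      simp [List.flatMap_append]
    rw [List.foldl_cons, List.foldl_nil, hsplit,
        pv_insertBy_append _ x _ _ ?hpre, pv_insertBy_front _ x _ ?hpost]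
    case hpre =>
      intro y hy
      simp only [List.mem_append] at hy
      rcases hy with hy | hy
      · obtain ⟨d, hd, hyf⟩ := List.mem_flatMap.1 hy
        have : key y = d := by simpa using (List.mem_filter.1 hyf).2
        simp only [decide_eq_false_iff_not, not_lt]
        have := hlt1 d hd
        omega
      · have : key y = key x := by simpa [hF] using (List.mem_filter.1 hy).2
        simp [this]
    case hpost =>
      intro y hy
      obtain ⟨d, hd, hyf⟩ := List.mem_flatMap.1 hy
      have : key y = d := by simpa using (List.mem_filter.1 hyf).2
      simp only [decide_eq_true_eq]
      have := hlt2 d hd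
      omega
    -- now match the buckets of ys ++ [x]
    have hb1 : ds1.flatMap (fun d => ys.filter (fun y => key y == d) ++ [x].filter (fun y => key y == d))
        = ds1.flatMap F := by
      apply List.flatMap_congr
      intro d hd
      have hne : (key x == d) = false := by
        have := hlt1 d hd; simp; omega
      simp [hF, List.filter, hne]
    have hb2 : ds2.flatMap (fun d => ys.filter (fun y => key y == d) ++ [x].filter (fun y => key y == d))
        = ds2.flatMap F := by
      apply List.flatMap_congr
      intro d hd
      have hne : (key x == d) = false := by
        have := hlt2 d hd; simp; omega
      simp [hF, List.filter, hne]
    simp only [List.flatMap_append, List.flatMap_cons, List.filter_append]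
    rw [hb1, hb2]
    simp [hF]

-- A's cell-building loop builds pvCells
theorem pv_cells_eq (rows cols : Int) :
    (PySem.List.pyRange 0 rows).foldl
      (fun acc r => (PySem.List.pyRange 0 cols).foldl (fun acc c => acc ++ [(r, c)]) acc) []
    = pvCells rows cols := by
  simp only [PySem.List.foldl_append_singleton_eq_map]
  rw [PySem.List.foldl_append_eq_flatMap (fun r => (PySem.List.pyRange 0 cols).map (fun c => (r, c)))]
  rfl

-- B's bucket dict, read back at key d, is the row-major bucket of d
theorem pv_buckets_getD (rows cols rCenter cCenter d : Int) :
    ((PySem.List.pyRange 0 rows).foldl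
      (fun bk r => (PySem.List.pyRange 0 cols).foldl
        (fun bk c => bk.modify (|r - rCenter| + |c - cCenter|) [] (· ++ [(r, c)])) bk)
      (PySem.Dict.empty (κ := Int) (ν := List (Int × Int)))).getD d []
    = (pvCells rows cols).filter (fun x => |x.1 - rCenter| + |x.2 - cCenter| == d) := by
  have step : (PySem.List.pyRange 0 rows).foldl
      (fun bk r => (PySem.List.pyRange 0 cols).foldl
        (fun bk c => bk.modify (|r - rCenter| + |c - cCenter|) [] (· ++ [(r, c)])) bk)
      (PySem.Dict.empty (κ := Int) (ν := List (Int × Int)))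
      = ((pvCells rows cols).map (fun x => (|x.1 - rCenter| + |x.2 - cCenter|, x))).foldl
        (fun bk p => bk.modify p.1 [] (· ++ [p.2])) PySem.Dict.empty := by
    rw [List.foldl_map, pvCells, List.foldl_flatMap]
    simp [List.foldl_map]
  rw [step, PySem.Dict.getD_foldl_modify_append]
  simp [PySem.Dict.empty, PySem.Dict.getD, PySem.Dict.get?, List.filter_map, Function.comp_def]

-- every cell's distance lies in [dmin, dmax]
theorem pv_key_mem (rows cols rCenter cCenter : Int) (h : ¬(rows ≤ 0 ∨ cols ≤ 0))
    (x : Int × Int) (hx : x ∈ pvCells rows cols) :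
    |x.1 - rCenter| + |x.2 - cCenter| ∈
      PySem.List.pyRange
        (max 0 (max (-rCenter) (rCenter - rows + 1)) + max 0 (max (-cCenter) (cCenter - cols + 1)))
        (max |rCenter| |rows - 1 - rCenter| + max |cCenter| |cols - 1 - cCenter| + 1) := by
  obtain ⟨r, hr, hc⟩ := List.mem_flatMap.1 hx
  obtain ⟨c, hc', rfl⟩ := List.mem_map.1 hc
  rw [PySem.List.mem_pyRange_one] at hr hc'
  rw [PySem.List.mem_pyRange_one]
  simp only [Int.abs_eq_natAbs]
  omega

-- ===== VERDICT (by name: the statement is the Claim_ definition above) =====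
theorem DistanceOrder_spec : Claim_equal_DistanceOrder := by
  intro rows cols rCenter cCenter _
  unfold Spec_DistanceOrder DistanceOrder DistanceOrder_alt
  rw [pv_cells_eq]
  by_cases h : rows ≤ 0 ∨ cols ≤ 0
  · have : pvCells rows cols = [] := by
      apply List.eq_nil_iff_forall_not_mem.2
      intro x hx
      obtain ⟨r, hr, hc⟩ := List.mem_flatMap.1 hx
      obtain ⟨c, hc', rfl⟩ := List.mem_map.1 hc
      rw [PySem.List.mem_pyRange_one] at hr hc'
      omega
    rw [this, PySem.List.sorted_eq_foldl_insertBy]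
    simp [h]
  · simp only [h, if_false]
    rw [PySem.List.foldl_append_eq_flatMap]
    rw [pv_sorted_eq_flatMap_filter (fun cell => |cell.1 - rCenter| + |cell.2 - cCenter|)
      (pvCells rows cols) _ (pv_pyRange_pairwise_lt _ _) (pv_key_mem rows cols rCenter cCenter h)]
    simp only [List.nil_append]
    apply List.flatMap_congr
    intro d _
    rw [pv_buckets_getD]
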